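-- pv_equiv track=rewrite | github.com/ZestyZeke/project-euler | problem5/python-solution/p5.py | find_first_divisible_num
-- ===== SOURCE A (Python) =====
-- def find_first_divisible_num(divis, bound):
--     num = bound
--     found = False
--
--     while not found:
--         num += 1
--         found = True
--         for d in divis:
--             if num % d != 0:
--                 found = False
--                 break
--     return num
-- ===== SOURCE B (Python) =====
-- def find_first_divisible_num(divis, bound):
--     l = 1
--     for d in divis:
--         g = l
--         x = abs(d)
--         while x:
--             g, x = x, g % x
--         l = l * abs(d) // g
--     return bound + l - bound % l
-- ===== Notes on version B (the rewrite author's own statement) =====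
-- stated objective: faster
-- what changed: Instead of incrementing num from bound and testing every divisor each step, B computes the LCM of the divisors (via Euclid's gcd) once and returns the next multiple of it above bound in closed form; intended as asymptotically faster (a timing run saw A time out at n=16 where B returned, so no ratio could be measured).
import Mathlib
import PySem

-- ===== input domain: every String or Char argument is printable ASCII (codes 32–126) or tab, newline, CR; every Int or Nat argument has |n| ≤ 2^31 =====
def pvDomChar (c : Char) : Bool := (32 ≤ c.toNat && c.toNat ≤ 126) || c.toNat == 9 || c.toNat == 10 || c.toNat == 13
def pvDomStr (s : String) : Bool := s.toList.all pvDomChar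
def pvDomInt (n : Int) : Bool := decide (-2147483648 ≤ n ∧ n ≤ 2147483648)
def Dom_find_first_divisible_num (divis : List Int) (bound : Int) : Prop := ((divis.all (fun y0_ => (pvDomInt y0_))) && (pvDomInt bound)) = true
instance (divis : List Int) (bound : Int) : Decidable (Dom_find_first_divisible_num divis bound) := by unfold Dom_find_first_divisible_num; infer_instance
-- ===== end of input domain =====

-- B replaces A's linear search from bound (retesting every divisor at each step) by computing
-- the LCM of the divisors once with Euclid's gcd and returning the next multiple above bound
-- in closed form (objective: faster).

-- ===== PORT A =====
-- A's while loop, transliterated with a fuel guard that only makes it total; under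
-- Pre_ the fuel (product of |d|) is provably sufficient, so the guard never fires.
def ffdGo (divis : List Int) (num : Int) : Nat → Int
  | 0 => num
  | fuel+1 =>
    let n := num + 1
    if divis.all (fun d => PySem.Int.mod n d == 0) then n
    else ffdGo divis n fuel

def find_first_divisible_num (divis : List Int) (bound : Int) : Int :=
  ffdGo divis bound ((divis.map Int.natAbs).prod)

-- ===== PORT B =====
-- termination helper for the Euclid loop (cited by name in decreasing_by)
theorem pyMod_natAbs_lt (g x : Int) (hx : ¬ x = 0) :
    (PySem.Int.mod g x).natAbs < x.natAbs := by
  rcases lt_or_gt_of_ne hx with hx | hx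
  · have := PySem.Int.mod_neg_bounds (a := g) hx
    omega
  · have h1 := PySem.Int.mod_nonneg (a := g) hx
    have h2 := PySem.Int.mod_lt (a := g) hx
    omega

-- the hand-written Euclid while-loop of Source B
def pyGcd (g x : Int) : Int :=
  if h : x = 0 then g else pyGcd x (PySem.Int.mod g x)
termination_by x.natAbs
decreasing_by exact pyMod_natAbs_lt g x h

def find_first_divisible_num_alt (divis : List Int) (bound : Int) : Int :=
  let l := divis.foldl (fun l d => PySem.Int.floordiv (l * |d|) (pyGcd l |d|)) 1
  bound + l - PySem.Int.mod bound l

-- ===== PRECONDITION & SPEC =====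
-- Pre_ excludes exactly the inputs on which Python A raises ZeroDivisionError (a zero divisor).
def Pre_find_first_divisible_num (divis : List Int) (_bound : Int) : Prop := (0 : Int) ∉ divis
instance (divis : List Int) (bound : Int) : Decidable (Pre_find_first_divisible_num divis bound) := by unfold Pre_find_first_divisible_num; infer_instance
def pvWitness_find_first_divisible_num : List Int × Int := ([2, 3], 10)

def Spec_find_first_divisible_num (divis : List Int) (bound : Int) (out : Int) : Prop := out = find_first_divisible_num_alt divis bound
instance (divis : List Int) (bound : Int) (out : Int) : Decidable (Spec_find_first_divisible_num divis bound out) := by unfold Spec_find_first_divisible_num; infer_instance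

-- ===== CLAIM (what is proved, stated in full; the proofs are below) =====
def Claim_equal_find_first_divisible_num : Prop := ∀ (divis : List Int) (bound : Int), Dom_find_first_divisible_num divis bound → Pre_find_first_divisible_num divis bound → Spec_find_first_divisible_num divis bound (find_first_divisible_num divis bound)

-- ===== LEMMAS AND PROOFS =====

-- the Euclid loop on nonnegative inputs computes Nat.gcd
theorem pyGcd_natCast : ∀ (x g : Nat), pyGcd (g : Int) (x : Int) = (Nat.gcd g x : Int) := by
  intro x
  induction x using Nat.strong_induction_on with
  | _ x ih =>
    intro g
    rw [pyGcd]
    by_cases hx0 : x = 0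
    · subst hx0; simp
    · have hx : ((x : Int) ≠ 0) := by exact_mod_cast hx0
      have hxpos : (0 : Int) < (x : Int) := by positivity
      rw [dif_neg hx]
      have hmod : PySem.Int.mod (g : Int) (x : Int) = ((g % x : Nat) : Int) := by
        rw [PySem.Int.mod_eq_emod_of_pos hxpos]
        exact_mod_cast (Int.natCast_mod g x).symm
      rw [hmod, ih (g % x) (Nat.mod_lt _ (Nat.pos_of_ne_zero hx0))]
      congr 1
      rw [Nat.gcd_comm, ← Nat.gcd_rec, Nat.gcd_comm]

-- one fold step equals the Nat lcm (cast), given a positive accumulator and nonzero divisor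
theorem step_eq (l d : Int) (hl : 0 < l) (_hd : d ≠ 0) :
    PySem.Int.floordiv (l * |d|) (pyGcd l |d|) = (Nat.lcm l.natAbs d.natAbs : Int) := by
  have hlc : l = (l.natAbs : Int) := by omega
  have habs : |d| = (d.natAbs : Int) := Int.abs_eq_natAbs d
  rw [habs]
  conv_lhs => rw [hlc]
  rw [pyGcd_natCast]
  have : (l.natAbs : Int) * (d.natAbs : Int) = ((l.natAbs * d.natAbs : Nat) : Int) := by push_cast; ring
  rw [this, PySem.Int.floordiv_natCast]
  rfl

-- lcm-dvd characterisation, lifted to Int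
theorem lcm_cast_dvd_iff (a b : Nat) (n : Int) :
    ((Nat.lcm a b : Nat) : Int) ∣ n ↔ ((a : Int) ∣ n ∧ (b : Int) ∣ n) := by
  rw [Int.natCast_dvd, Int.natCast_dvd, Int.natCast_dvd]
  exact ⟨fun h => ⟨(Nat.dvd_lcm_left a b).trans h, (Nat.dvd_lcm_right a b).trans h⟩,
         fun ⟨h1, h2⟩ => Nat.lcm_dvd h1 h2⟩

-- B's fold: there is a positive Nat L with value = ↑L dividing exactly the common multiples
theorem ffd_fold (divis : List Int) (h0 : (0 : Int) ∉ divis) :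
    ∀ (a : Nat), 0 < a →
      ∃ L : Nat, 0 < L ∧
        divis.foldl (fun l d => PySem.Int.floordiv (l * |d|) (pyGcd l |d|)) (a : Int) = (L : Int) ∧
        ∀ n : Int, ((L : Int) ∣ n ↔ ((a : Int) ∣ n ∧ ∀ d ∈ divis, d ∣ n)) := by
  induction divis with
  | nil => intro a ha; exact ⟨a, ha, rfl, by simp⟩
  | cons d tl ih =>
    intro a ha
    have hd : d ≠ 0 := fun h => h0 (by simp [h])
    have h0' : (0 : Int) ∉ tl := fun h => h0 (List.mem_cons_of_mem d h)
    have hstep : PySem.Int.floordiv ((a : Int) * |d|) (pyGcd (a : Int) |d|)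
        = (Nat.lcm a d.natAbs : Int) := by
      have := step_eq (a : Int) d (by exact_mod_cast ha) hd
      simpa using this
    have hpos : 0 < Nat.lcm a d.natAbs :=
      Nat.pos_of_ne_zero (Nat.lcm_ne_zero (by omega) (by omega))
    obtain ⟨L, hL, hEq, hIff⟩ := ih h0' (Nat.lcm a d.natAbs) hpos
    refine ⟨L, hL, ?_, ?_⟩
    · simpa [List.foldl_cons, hstep] using hEq
    · intro n
      rw [hIff n, lcm_cast_dvd_iff]
      constructor
      · rintro ⟨⟨h1, h2⟩, h3⟩
        exact ⟨h1, by intro e he; rcases List.mem_cons.mp he with rfl | he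
                      · exact (Int.natAbs_dvd).mp h2
                      · exact h3 e he⟩
      · rintro ⟨h1, h2⟩
        exact ⟨⟨h1, (Int.natAbs_dvd).mpr (h2 d (by simp))⟩,
               fun e he => h2 e (List.mem_cons_of_mem d he)⟩

-- A's divisibility test equals divisibility by every element
theorem all_iff (divis : List Int) (n : Int) :
    (divis.all (fun d => PySem.Int.mod n d == 0) = true) ↔ ∀ d ∈ divis, d ∣ n := by
  simp [List.all_eq_true, PySem.Int.mod_eq_zero_iff_dvd]

-- the fuelled loop reaches the unique multiple of L in (num, num+L] ∋ r
theorem ffdGo_eq (divis : List Int) (L r : Int) (hL : 0 < L)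
    (hiff : ∀ n : Int, (divis.all (fun d => PySem.Int.mod n d == 0) = true) ↔ L ∣ n)
    (hr : L ∣ r) :
    ∀ (fuel : Nat) (num : Int), r - L ≤ num → num < r → (r - num).toNat ≤ fuel →
      ffdGo divis num fuel = r := by
  intro fuel
  induction fuel with
  | zero => intro num h1 h2 h3; omega
  | succ fuel ih =>
    intro num h1 h2 h3
    rw [ffdGo]
    by_cases hall : divis.all (fun d => PySem.Int.mod (num + 1) d == 0) = true
    · simp only [hall, if_true]
      have hdvd : L ∣ (num + 1) := (hiff (num + 1)).mp hall
      have : L ∣ (r - (num + 1)) := Int.dvd_sub hr hdvd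
      rcases this with ⟨k, hk⟩
      have hk0 : k = 0 := by
        rcases lt_trichotomy k 0 with h | h | h
        · nlinarith
        · exact h
        · nlinarith
      subst hk0
      simp at hk
      omega
    · simp only [hall]
      have hne : num + 1 ≠ r := fun h => hall ((hiff (num + 1)).mpr (h ▸ hr))
      exact ih (num + 1) (by omega) (by omega) (by omega)

-- ===== VERDICT (by name: the statement is the Claim_ definition above) =====
theorem find_first_divisible_num_spec : Claim_equal_find_first_divisible_num := by
  intro divis bound _ hpre
  unfold Spec_find_first_divisible_num find_first_divisible_num find_first_divisible_num_alt
  obtain ⟨L, hL, hEq, hIff⟩ := ffd_fold divis hpre 1 one_pos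
  simp only [Nat.cast_one] at hEq
  rw [hEq]
  have hLpos : (0 : Int) < (L : Int) := by exact_mod_cast hL
  set m := PySem.Int.mod bound (L : Int) with hm
  have hmlo : 0 ≤ m := PySem.Int.mod_nonneg bound hLpos
  have hmhi : m < (L : Int) := PySem.Int.mod_lt bound hLpos
  have hfm := PySem.Int.floordiv_mul_add_mod bound (L : Int)
  set r := bound + (L : Int) - m with hrdef
  have hrd : (L : Int) ∣ r := ⟨PySem.Int.floordiv bound (L : Int) + 1, by rw [mul_add, mul_one, mul_comm]; omega⟩
  have hiff' : ∀ n : Int, (divis.all (fun d => PySem.Int.mod n d == 0) = true) ↔ (L : Int) ∣ n := by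
    intro n; rw [all_iff, hIff n]; simp
  -- fuel sufficiency: L divides and hence is at most the product of the |d|
  have hPd : ∀ d ∈ divis, d ∣ ((divis.map Int.natAbs).prod : Int) := by
    intro d hd
    have : d.natAbs ∣ (divis.map Int.natAbs).prod :=
      List.dvd_prod (List.mem_map_of_mem hd)
    exact (Int.dvd_natAbs.mpr dvd_rfl).trans (Int.natCast_dvd_natCast.mpr this)
  have hLP : (L : Int) ∣ ((divis.map Int.natAbs).prod : Int) :=
    (hIff _).mpr ⟨one_dvd _, hPd⟩
  have hPpos : 0 < (divis.map Int.natAbs).prod := by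
    apply List.prod_pos
    intro x hx
    rcases List.mem_map.mp hx with ⟨d, hd, rfl⟩
    have : d ≠ 0 := fun h => hpre (h ▸ hd)
    omega
  have hLle : (L : Int) ≤ ((divis.map Int.natAbs).prod : Int) :=
    Int.le_of_dvd (by exact_mod_cast hPpos) hLP
  exact ffdGo_eq divis (L : Int) r hLpos hiff' hrd _ bound (by omega) (by omega) (by omega)
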